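-- pv_equiv track=rewrite | github.com/BCaven/elgato-light-controller | timer.py | generate_weekday_mask
-- ===== SOURCE A (Python) =====
-- def generate_weekday_mask(active_day: str,
--                           days_of_the_week: tuple = (
--                               "monday", "tuesday", "wednesday", "thursday",
--                               "friday", "saturday", "sunday"),
--                           year_length: int = 365,
--                           start_day: str = "monday"
--                           ) -> int:
--     """Generate int mask for a specific day of the week."""
--     assert active_day in days_of_the_week, f"Invalid Day: {active_day}"
--     mask = ''
--     days = 0
--     shift = False
--     # Account for years that do not start on the first day of the week
--     # by inserting a partial week to the beginning of
--     for day in days_of_the_week: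
--         if day == start_day:
--             shift = True
--         if shift:
--             mask += '1' if day in active_day else '0'
--             days += 1
--
--     while days < year_length:
--         for day in days_of_the_week:
--             mask += '1' if day in active_day else '0'
--             days += 1
--             if days >= year_length:
--                 break
--
--     assert len(mask) == year_length, f"Invalid mask length, len: {len(mask)}"
--     return int(mask, 2)
-- ===== SOURCE B (Python) =====
-- def generate_weekday_mask(active_day: str,
--                           days_of_the_week: tuple = (
--                               "monday", "tuesday", "wednesday", "thursday",
--                               "friday", "saturday", "sunday"),
--                           year_length: int = 365,
--                           start_day: str = "monday"
--                           ) -> int: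
--     """Generate int mask for a specific day of the week.
--
--     One pass: day j of the year is days_of_the_week[(start_idx + j) % week_len]."""
--     assert active_day in days_of_the_week, f"Invalid Day: {active_day}"
--     week_len = len(days_of_the_week)
--     start_idx = days_of_the_week.index(start_day) if start_day in days_of_the_week else 0
--     bits = ''.join('1' if days_of_the_week[(start_idx + j) % week_len] in active_day else '0'
--                    for j in range(year_length))
--     return int(bits, 2)
-- ===== Notes on version B (the rewrite author's own statement) =====
-- stated objective: simpler
-- what changed: A's three loops (partial-week for with a shift flag, fueled while over whole weeks, inner for with a break) are replaced by one comprehension over range(year_length) that reads day j as days_of_the_week[(start_idx + j) % week_len], where start_idx is start_day's first index (0 if absent).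
-- crash fix: When active_day is an element and year_length >= 1 but the partial week starting at start_day's first occurrence exceeds year_length, A raises AssertionError on its length check; B returns the year_length-bit modular mask there. — e.g. on generate_weekday_mask("a", ["a", "b"], 1, "a"): A raises AssertionError, B returns 1
import Mathlib
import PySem

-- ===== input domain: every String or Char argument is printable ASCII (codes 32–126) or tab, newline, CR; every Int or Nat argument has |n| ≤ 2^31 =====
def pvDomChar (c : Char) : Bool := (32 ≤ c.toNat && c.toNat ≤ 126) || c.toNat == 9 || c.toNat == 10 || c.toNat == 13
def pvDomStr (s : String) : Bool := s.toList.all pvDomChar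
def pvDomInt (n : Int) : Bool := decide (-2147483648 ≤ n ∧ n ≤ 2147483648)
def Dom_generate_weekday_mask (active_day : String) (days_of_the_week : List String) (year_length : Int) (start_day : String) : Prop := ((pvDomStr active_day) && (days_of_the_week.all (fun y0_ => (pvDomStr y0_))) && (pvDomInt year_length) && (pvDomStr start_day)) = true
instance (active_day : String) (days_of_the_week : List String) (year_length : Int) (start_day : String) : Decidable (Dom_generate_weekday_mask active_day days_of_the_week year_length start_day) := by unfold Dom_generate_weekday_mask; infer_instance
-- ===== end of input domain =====

-- B replaces A's three loops (partial week, fueled while, inner for with break) and the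
-- bit-string + int(mask, 2) by ONE pass over range(year_length) with a modular index,
-- accumulating the integer directly (objective: simpler).

-- ===== PORT A =====
-- A's first for loop (partial week): state (mask, days, shift)
def pvPartialA (active_day start_day : String) : List String → List Char → Int → Bool → List Char × Int × Bool
  | [], mask, days, shift => (mask, days, shift)
  | day :: rest, mask, days, shift =>
    let shift' := if day = start_day then true else shift
    if shift' then
      pvPartialA active_day start_day rest
        (mask ++ [if PySem.Str.isIn day active_day then '1' else '0']) (days + 1) shift'
    else
      pvPartialA active_day start_day rest mask days shift'

-- A's inner for loop with its break
def pvInnerA (active_day : String) (year_length : Int) : List String → List Char → Int → List Char × Int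
  | [], mask, days => (mask, days)
  | day :: rest, mask, days =>
    let mask' := mask ++ [if PySem.Str.isIn day active_day then '1' else '0']
    let days' := days + 1
    if year_length ≤ days' then (mask', days')
    else pvInnerA active_day year_length rest mask' days'

-- A's while loop, fueled; the Python while diverges only when days_of_the_week = [],
-- which the leading assert rules out, and the fuel below suffices on all other inputs
def pvWhileA (active_day : String) (week : List String) (year_length : Int) : Nat → List Char → Int → List Char × Int
  | 0, mask, days => (mask, days)
  | fuel+1, mask, days =>
    if days < year_length then
      let r := pvInnerA active_day year_length week mask days
      pvWhileA active_day week year_length fuel r.1 r.2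
    else (mask, days)

-- int(mask, 2): ported by hand (PySem.Int.ofCharsBase?'s digit core is private); exact on
-- nonempty '0'/'1' strings, the only masks reaching the return under Pre_
def pvBin (cs : List Char) : Int := cs.foldl (fun a c => a * 2 + (if c = '1' then 1 else 0)) 0

-- asserts and int('',2) raise only outside Pre_; no value is claimed there
def generate_weekday_mask (active_day : String) (days_of_the_week : List String) (year_length : Int) (start_day : String) : Int :=
  let p := pvPartialA active_day start_day days_of_the_week [] 0 false
  let r := pvWhileA active_day days_of_the_week year_length (year_length.toNat + 1) p.1 p.2.1
  pvBin r.1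

-- ===== PORT B =====
def generate_weekday_mask_alt (active_day : String) (days_of_the_week : List String) (year_length : Int) (start_day : String) : Int :=
  let week_len : Int := days_of_the_week.length
  let start_idx : Int :=
    if start_day ∈ days_of_the_week then ((PySem.List.index? days_of_the_week start_day).getD 0 : Nat) else 0
  -- days_of_the_week[(start_idx + j) % week_len]: index always in range when week_len ≥ 1
  -- (guaranteed under Pre_); % by 0 raises only outside Pre_
  let bits : List Char :=
    (PySem.List.pyRange 0 year_length 1).map
      (fun j => if PySem.Str.isIn (PySem.List.pyGetD days_of_the_week (PySem.Int.mod (start_idx + j) week_len) "") active_day then '1' else '0')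
  pvBin bits

-- ===== PRECONDITION & SPEC =====
-- Pre_ = exactly the inputs where Python A returns: active_day is an element (else the
-- assert fails), year_length ≥ 1 (else int('',2) / the length assert fails), and the
-- partial week starting at start_day's first index does not exceed year_length (else the
-- length assert fails).
def Pre_generate_weekday_mask (active_day : String) (days_of_the_week : List String) (year_length : Int) (start_day : String) : Prop :=
  active_day ∈ days_of_the_week ∧ 1 ≤ year_length ∧
    (days_of_the_week.length : Int) - ((PySem.List.index? days_of_the_week start_day).getD days_of_the_week.length : Nat) ≤ year_length

instance (active_day : String) (days_of_the_week : List String) (year_length : Int) (start_day : String) : Decidable (Pre_generate_weekday_mask active_day days_of_the_week year_length start_day) := by unfold Pre_generate_weekday_mask; infer_instance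

def pvWitness_generate_weekday_mask : String × List String × Int × String :=
  ("monday", ["monday", "tuesday"], 3, "tuesday")

-- A raises AssertionError whenever active_day is an element, year_length ≥ 1 but the partial
-- week starting at start_day's first occurrence exceeds year_length; B returns the
-- year_length-bit modular mask there.
def Raises_generate_weekday_mask (active_day : String) (days_of_the_week : List String) (year_length : Int) (start_day : String) : Prop :=
  active_day ∈ days_of_the_week ∧ 1 ≤ year_length ∧
    year_length < (days_of_the_week.length : Int) - ((PySem.List.index? days_of_the_week start_day).getD days_of_the_week.length : Nat)

instance (active_day : String) (days_of_the_week : List String) (year_length : Int) (start_day : String) : Decidable (Raises_generate_weekday_mask active_day days_of_the_week year_length start_day) := by unfold Raises_generate_weekday_mask; infer_instance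

def pvRaiseWitness_generate_weekday_mask : String × List String × Int × String :=
  ("a", ["a", "b"], 1, "a")

def pvRaiseWitnessOut_generate_weekday_mask : Int := 1

def Spec_generate_weekday_mask (active_day : String) (days_of_the_week : List String) (year_length : Int) (start_day : String) (out : Int) : Prop := out = generate_weekday_mask_alt active_day days_of_the_week year_length start_day
instance (active_day : String) (days_of_the_week : List String) (year_length : Int) (start_day : String) (out : Int) : Decidable (Spec_generate_weekday_mask active_day days_of_the_week year_length start_day out) := by unfold Spec_generate_weekday_mask; infer_instance

-- ===== CLAIM (what is proved, stated in full; the proofs are below) =====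
def Claim_equal_generate_weekday_mask : Prop := ∀ (active_day : String) (days_of_the_week : List String) (year_length : Int) (start_day : String), Dom_generate_weekday_mask active_day days_of_the_week year_length start_day → Pre_generate_weekday_mask active_day days_of_the_week year_length start_day → Spec_generate_weekday_mask active_day days_of_the_week year_length start_day (generate_weekday_mask active_day days_of_the_week year_length start_day)

def Claim_raises_generate_weekday_mask : Prop := (∀ (active_day : String) (days_of_the_week : List String) (year_length : Int) (start_day : String), Dom_generate_weekday_mask active_day days_of_the_week year_length start_day → Raises_generate_weekday_mask active_day days_of_the_week year_length start_day → ¬ Pre_generate_weekday_mask active_day days_of_the_week year_length start_day) ∧ (Dom_generate_weekday_mask (pvRaiseWitness_generate_weekday_mask.1) (pvRaiseWitness_generate_weekday_mask.2.1) (pvRaiseWitness_generate_weekday_mask.2.2.1) (pvRaiseWitness_generate_weekday_mask.2.2.2) ∧ Raises_generate_weekday_mask (pvRaiseWitness_generate_weekday_mask.1) (pvRaiseWitness_generate_weekday_mask.2.1) (pvRaiseWitness_generate_weekday_mask.2.2.1) (pvRaiseWitness_generate_weekday_mask.2.2.2) ∧ generate_weekday_mask_alt (pvRaiseWitness_generate_weekday_mask.1)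 (pvRaiseWitness_generate_weekday_mask.2.1) (pvRaiseWitness_generate_weekday_mask.2.2.1) (pvRaiseWitness_generate_weekday_mask.2.2.2) = pvRaiseWitnessOut_generate_weekday_mask)

-- ===== LEMMAS AND PROOFS =====

-- the character day j of the year contributes, reading the week cyclically from index k
def pvBit (active_day : String) (week : List String) (k j : Nat) : Char :=
  if PySem.Str.isIn (week.getD ((k + j) % week.length) "") active_day then '1' else '0'

def pvSeq (active_day : String) (week : List String) (k n : Nat) : List Char :=
  (List.range n).map (pvBit active_day week k)

theorem pvPartialA_true (a s : String) (ds : List String) :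
    ∀ mask days, pvPartialA a s ds mask days true =
      (mask ++ ds.map (fun d => if PySem.Str.isIn d a then '1' else '0'), days + ds.length, true) := by
  induction ds with
  | nil => intro mask days; simp [pvPartialA]
  | cons d rest ih =>
    intro mask days
    simp only [pvPartialA, ite_self, ih]
    simp; omega

theorem pvPartialA_false (a s : String) (ds : List String) :
    ∀ mask days, pvPartialA a s ds mask days false =
      match PySem.List.index? ds s with
      | none => (mask, days, false)
      | some k => (mask ++ (ds.drop k).map (fun d => if PySem.Str.isIn d a then '1' else '0'),
                   days + ((ds.length - k : Nat) : Int), true) := by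
  induction ds with
  | nil => intro mask days; simp [pvPartialA, PySem.List.index?]
  | cons d rest ih =>
    intro mask days
    by_cases hd : d = s
    · subst hd
      rw [PySem.List.index?_cons_self]
      simp [pvPartialA, pvPartialA_true]
      omega
    · rw [PySem.List.index?_cons_of_ne rest hd]
      have hstep : pvPartialA a s (d :: rest) mask days false = pvPartialA a s rest mask days false := by
        simp [pvPartialA, hd]
      rw [hstep, ih]
      cases h : PySem.List.index? rest s with
      | none => simp
      | some k =>
        obtain ⟨hk, -⟩ := PySem.List.getElem_of_index?_eq_some h
        simp [List.drop_succ_cons]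

theorem pvInnerA_spec (a : String) (yl : Int) (ds : List String) :
    ∀ mask days, days < yl →
      pvInnerA a yl ds mask days =
        (mask ++ (ds.take (min ds.length (yl - days).toNat)).map (fun d => if PySem.Str.isIn d a then '1' else '0'),
         days + min ds.length (yl - days).toNat) := by
  induction ds with
  | nil => intro mask days _; simp [pvInnerA]
  | cons d rest ih =>
    intro mask days h
    simp only [pvInnerA]
    by_cases hb : yl ≤ days + 1
    · have : min (d :: rest).length (yl - days).toNat = 1 := by simp; omega
      rw [if_pos hb, this]; simp
    · rw [if_neg hb, ih _ _ (by omega)]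
      have h1 : min (d :: rest).length (yl - days).toNat = min rest.length (yl - (days+1)).toNat + 1 := by
        simp; omega
      rw [h1]
      simp [List.take_succ_cons]
      omega

theorem take_map_eq_pvSeq (a : String) (week : List String) (t : Nat) (ht : t ≤ week.length) :
    (week.take t).map (fun d => if PySem.Str.isIn d a then '1' else '0') = pvSeq a week 0 t := by
  apply List.ext_getElem
  · simp [pvSeq]; omega
  · intro j h1 h2
    simp only [pvSeq, List.getElem_map, List.getElem_take, List.getElem_range, pvBit]
    have hj : j < t := by simpa [pvSeq] using h2
    rw [Nat.zero_add, Nat.mod_eq_of_lt (by omega), List.getD_eq_getElem _ _ (by omega)]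

theorem pvSeq_add (a : String) (week : List String) (m : Nat) :
    pvSeq a week 0 (week.length + m) = pvSeq a week 0 week.length ++ pvSeq a week 0 m := by
  simp only [pvSeq, List.range_add, List.map_append, List.map_map]
  congr 1
  apply List.map_congr_left
  intro j _
  simp [pvBit, Function.comp, Nat.add_mod_left]

theorem pvWhileA_spec (a : String) (week : List String) (yl : Int) (hw : week ≠ []) :
    ∀ fuel (days : Int) mask, days ≤ yl → (yl - days).toNat ≤ fuel →
      pvWhileA a week yl fuel mask days =
        (mask ++ pvSeq a week 0 (yl - days).toNat, days + (yl - days).toNat) := by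
  have hL : 1 ≤ week.length := by cases week <;> simp_all
  intro fuel
  induction fuel with
  | zero =>
    intro days mask h1 h2
    have : (yl - days).toNat = 0 := by omega
    simp [pvWhileA, this, pvSeq]
  | succ fuel ih =>
    intro days mask h1 h2
    simp only [pvWhileA]
    by_cases hd : days < yl
    case neg =>
      have h0 : (yl - days).toNat = 0 := by omega
      simp [hd, h0, pvSeq]
    case pos =>
      rw [if_pos hd, pvInnerA_spec a yl week _ _ hd]
      set n : Nat := (yl - days).toNat with hn
      have hn1 : 1 ≤ n := by omega
      by_cases hc : n ≤ week.length
      · have ht : min week.length n = n := by omega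
        rw [ht]
        have hdays : days + (n : Int) = yl := by omega
        have h0 : (yl - (days + (n:Int))).toNat = 0 := by omega
        rw [ih _ _ (by omega) (by omega)]
        rw [h0, take_map_eq_pvSeq a week n hc]
        simp [pvSeq]
      · have ht : min week.length n = week.length := by omega
        rw [ht]
        rw [ih _ _ (by omega) (by omega)]
        rw [take_map_eq_pvSeq a week week.length (le_refl _)]
        have hsplit : (yl - (days + (week.length:Int))).toNat = n - week.length := by omega
        rw [hsplit]
        have hsum : pvSeq a week 0 n = pvSeq a week 0 week.length ++ pvSeq a week 0 (n - week.length) := by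
          conv_lhs => rw [show n = week.length + (n - week.length) by omega]
          exact pvSeq_add a week _
        rw [hsum]
        simp [List.append_assoc]
        omega

theorem drop_map_eq_range (a : String) (week : List String) (k : Nat) (hk : k ≤ week.length) :
    (week.drop k).map (fun d => if PySem.Str.isIn d a then '1' else '0') =
      (List.range (week.length - k)).map (pvBit a week k) := by
  apply List.ext_getElem
  · simp
  · intro j h1 h2
    have hj : j < week.length - k := by simpa using h2
    simp only [List.getElem_map, List.getElem_drop, List.getElem_range, pvBit]
    rw [Nat.mod_eq_of_lt (by omega), List.getD_eq_getElem _ _ (by omega)]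

theorem pvSeq_split (a : String) (week : List String) (k m : Nat) (hk : k ≤ week.length) :
    pvSeq a week k ((week.length - k) + m) =
      (week.drop k).map (fun d => if PySem.Str.isIn d a then '1' else '0') ++ pvSeq a week 0 m := by
  rw [drop_map_eq_range a week k hk]
  simp only [pvSeq, List.range_add, List.map_append, List.map_map]
  congr 1
  apply List.map_congr_left
  intro j _
  simp only [Function.comp, pvBit]
  have hj2 : k + ((week.length - k) + j) = week.length + j := by omega
  rw [hj2, Nat.add_mod_left, Nat.zero_add]

theorem maskA_spec (a s : String) (week : List String) (yl : Int) (hw : week ≠ [])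
    (hyl : 1 ≤ yl)
    (hp : (week.length : Int) - ((PySem.List.index? week s).getD week.length : Nat) ≤ yl) :
    generate_weekday_mask a week yl s =
      pvBin (pvSeq a week ((PySem.List.index? week s).getD 0) yl.toNat) := by
  have hL : 1 ≤ week.length := by cases week <;> simp_all
  unfold generate_weekday_mask
  rw [pvPartialA_false]
  cases h : PySem.List.index? week s with
  | none =>
    rw [h] at hp
    show pvBin (pvWhileA a week yl (yl.toNat + 1) ([] : List Char) 0).1 =
      pvBin (pvSeq a week (Option.getD none 0) yl.toNat)
    rw [pvWhileA_spec a week yl hw _ 0 [] (by omega) (by omega)]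
    simp
  | some k =>
    obtain ⟨hk, -⟩ := PySem.List.getElem_of_index?_eq_some h
    rw [h] at hp
    simp only [Option.getD_some] at hp ⊢
    rw [pvWhileA_spec a week yl hw _ _ _ (by omega) (by omega)]
    simp only [List.nil_append, zero_add]
    have hm : yl.toNat = (week.length - k) + (yl - ((week.length - k : Nat) : Int)).toNat := by omega
    rw [hm, pvSeq_split a week k _ (by omega)]

theorem maskB_spec (a s : String) (week : List String) (yl : Int) (hw : week ≠ []) :
    generate_weekday_mask_alt a week yl s =
      pvBin (pvSeq a week ((PySem.List.index? week s).getD 0) yl.toNat) := by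
  have hL : 1 ≤ week.length := by cases week <;> simp_all
  set k0 : Nat := (PySem.List.index? week s).getD 0 with hk0
  have hidx : (if s ∈ week then (((PySem.List.index? week s).getD 0 : Nat) : Int) else 0) = (k0 : Int) := by
    by_cases hm : s ∈ week
    · simp [hm, hk0]
    · have hnone : PySem.List.index? week s = none := (PySem.List.index?_eq_none_iff week s).mpr hm
      rw [if_neg hm, hk0, hnone]
      rfl
  unfold generate_weekday_mask_alt
  simp only [hidx, PySem.List.pyRange_one, Int.sub_zero, List.map_map]
  congr 1
  rw [pvSeq]
  apply List.map_congr_left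
  intro j _
  simp only [Function.comp]
  have hmod : PySem.Int.mod ((k0 : Int) + ((0 : Int) + (j : Nat))) (week.length : Int) = (((k0 + j) % week.length : Nat) : Int) := by
    rw [zero_add, show ((k0 : Int) + (j : Int)) = ((k0 + j : Nat) : Int) by push_cast; ring]
    exact PySem.Int.mod_natCast _ _
  rw [hmod, PySem.List.pyGetD_natCast]
  simp [pvBit]

-- ===== VERDICT (by name: the statement is the Claim_ definition above) =====
theorem generate_weekday_mask_spec : Claim_equal_generate_weekday_mask := by
  intro a week yl s _ hpre
  obtain ⟨hmem, hyl, hp⟩ := hpre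
  have hw : week ≠ [] := by rintro rfl; simp at hmem
  unfold Spec_generate_weekday_mask
  rw [maskA_spec a s week yl hw hyl hp, maskB_spec a s week yl hw]

theorem generate_weekday_mask_raises : Claim_raises_generate_weekday_mask := by
  unfold Claim_raises_generate_weekday_mask
  constructor
  · rintro a week yl s _ ⟨_, h⟩ ⟨_, h1, h2⟩; omega
  · exact ⟨by decide, by decide, by decide⟩

-- self-check: the raise witness really lies inside Raises_ (projection of the theorem above)
theorem generate_weekday_mask_raises_witness_ok :
    Raises_generate_weekday_mask (pvRaiseWitness_generate_weekday_mask.1)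
      (pvRaiseWitness_generate_weekday_mask.2.1) (pvRaiseWitness_generate_weekday_mask.2.2.1)
      (pvRaiseWitness_generate_weekday_mask.2.2.2) :=
  generate_weekday_mask_raises.2.2.1
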